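-- pv_equiv track=rewrite | github.com/awslabs/slapo | examples/t5/ds_hf_t5.py | even_partition
-- ===== SOURCE A (Python) =====
-- def even_partition(num_layers, num_pp):
--     """Evenly partition layers for pipelining. The pipeline stages are evenly
--     assigned to encoder and decoder. If num_layers is not divisible by
--     num_pp, the last num_layers % num_pp partitions will have one more layer.
--     """
--     if num_pp % 2 != 0:
--         raise ValueError("num_pp must be even")
--     num_pp = num_pp // 2
--
--     ret = []
--     for _ in range(2):
--         remainder = num_layers % num_pp
--         size_list = [num_layers // num_pp] * num_pp
--
--         curr = size_list[0] - 1
--         sub_ret = [curr]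
--         for idx, size in enumerate(size_list):
--             size = size + 1 if num_pp - idx - 1 <= remainder else size
--             curr += size
--             sub_ret.append(curr)
--         ret.append(sub_ret[: num_pp - 1])
--     return ret
-- ===== SOURCE B (Python) =====
-- def even_partition(num_layers, num_pp):
--     """Closed-form boundaries: one comprehension instead of the cumulative-sum loop."""
--     if num_pp % 2 != 0:
--         raise ValueError("num_pp must be even")
--     half = num_pp // 2
--     base = num_layers // half
--     rem = num_layers % half
--     cut = half - 1 - rem
--     boundary = [base - 1 + i * base + max(0, i - cut) for i in range(half - 1)]
--     return [boundary, list(boundary)]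
-- ===== Notes on version B (the rewrite author's own statement) =====
-- stated objective: simpler
-- what changed: Replaced the two-pass running-accumulator loop (prefix sums of per-stage sizes) by a single closed-form comprehension giving each boundary positionally, building one list that is returned twice.
import Mathlib
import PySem

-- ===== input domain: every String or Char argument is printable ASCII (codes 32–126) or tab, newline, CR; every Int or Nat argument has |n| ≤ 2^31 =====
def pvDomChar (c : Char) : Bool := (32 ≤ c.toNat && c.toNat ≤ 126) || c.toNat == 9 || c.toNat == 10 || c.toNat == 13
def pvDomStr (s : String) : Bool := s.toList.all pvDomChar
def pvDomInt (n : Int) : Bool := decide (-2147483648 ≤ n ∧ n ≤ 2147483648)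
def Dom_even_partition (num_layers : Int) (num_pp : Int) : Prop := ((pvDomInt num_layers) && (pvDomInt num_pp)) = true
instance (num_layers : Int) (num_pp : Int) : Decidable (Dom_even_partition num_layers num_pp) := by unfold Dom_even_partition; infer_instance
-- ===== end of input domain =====

-- B replaces A's running-accumulator prefix-sum loop by one closed-form comprehension (objective: simpler).

-- ===== PORT A =====
-- Literal port of A. The two raising spots (num_layers % 0 when num_pp = 0, size_list[0]
-- on an empty list when num_pp < 0) are outside Pre_; pyGet? …|>.getD 0 marks the IndexError spot.
def even_partition (num_layers : Int) (num_pp : Int) : List (List Int) :=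
  if PySem.Int.mod num_pp 2 ≠ 0 then []  -- raise ValueError (outside Pre_)
  else
    let np := PySem.Int.floordiv num_pp 2
    (PySem.List.pyRange 0 2 1).foldl (fun ret _ =>
      let remainder := PySem.Int.mod num_layers np
      let size_list := PySem.List.pyRepeat [PySem.Int.floordiv num_layers np] np
      let curr0 := ((PySem.List.pyGet? size_list 0).getD 0) - 1  -- none = IndexError (outside Pre_)
      let st := (PySem.List.enumerate size_list 0).foldl
        (fun (st : Int × List Int) p =>
          let size := if np - p.1 - 1 ≤ remainder then p.2 + 1 else p.2
          (st.1 + size, st.2 ++ [st.1 + size]))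
        (curr0, [curr0])
      ret ++ [PySem.List.slice st.2 none (some (np - 1))]) []

-- ===== PORT B =====
def even_partition_alt (num_layers : Int) (num_pp : Int) : List (List Int) :=
  if PySem.Int.mod num_pp 2 ≠ 0 then []  -- raise ValueError (outside Pre_)
  else
    let half := PySem.Int.floordiv num_pp 2
    let base := PySem.Int.floordiv num_layers half
    let rem := PySem.Int.mod num_layers half
    let cut := half - 1 - rem
    let boundary := (PySem.List.pyRange 0 (half - 1) 1).map
      (fun i => base - 1 + i * base + max 0 (i - cut))
    [boundary, boundary]

-- ===== PRECONDITION & SPEC =====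
-- Pre_ excludes exactly the inputs where A raises: odd num_pp (ValueError),
-- num_pp = 0 (ZeroDivisionError) and negative even num_pp (IndexError).
def Pre_even_partition (num_layers : Int) (num_pp : Int) : Prop :=
  PySem.Int.mod num_pp 2 = 0 ∧ 2 ≤ num_pp
instance (num_layers : Int) (num_pp : Int) : Decidable (Pre_even_partition num_layers num_pp) := by unfold Pre_even_partition; infer_instance
def pvWitness_even_partition : Int × Int := (24, 4)

def Spec_even_partition (num_layers : Int) (num_pp : Int) (out : List (List Int)) : Prop := out = even_partition_alt num_layers num_pp
instance (num_layers : Int) (num_pp : Int) (out : List (List Int)) : Decidable (Spec_even_partition num_layers num_pp out) := by unfold Spec_even_partition; infer_instance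

-- ===== CLAIM (what is proved, stated in full; the proofs are below) =====
def Claim_equal_even_partition : Prop := ∀ (num_layers : Int) (num_pp : Int), Dom_even_partition num_layers num_pp → Pre_even_partition num_layers num_pp → Spec_even_partition num_layers num_pp (even_partition num_layers num_pp)

-- ===== LEMMAS AND PROOFS =====

-- Closed form of one boundary (what B computes at position i).
def pvF (base cut i : Int) : Int := base - 1 + i * base + max 0 (i - cut)

-- A's inner loop over enumerate(replicate m base), started at curr = pvF base cut s,
-- appends exactly the closed-form values pvF at s+1 ... s+m.
theorem pvLoop (np rem base cut : Int) (hcut : cut = np - 1 - rem) :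
    ∀ (m : Nat) (s : Int) (acc : List Int),
    (PySem.List.enumerate (List.replicate m base) s).foldl
        (fun (st : Int × List Int) p =>
          (st.1 + if np - p.1 - 1 ≤ rem then p.2 + 1 else p.2,
           st.2 ++ [st.1 + if np - p.1 - 1 ≤ rem then p.2 + 1 else p.2]))
        (pvF base cut s, acc)
      = (pvF base cut (s + m),
         acc ++ (List.range m).map (fun k : Nat => pvF base cut (s + (k : Int) + 1))) := by
  intro m
  induction m with
  | zero => intro s acc; simp
  | succ m ih =>
    intro s acc
    rw [List.replicate_succ, PySem.List.enumerate_cons]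
    have hstep : (pvF base cut s + if np - s - 1 ≤ rem then base + 1 else base)
        = pvF base cut (s + 1) := by
      have hb : (s + 1) * base = s * base + base := by ring
      simp only [pvF, hb]; split_ifs <;> omega
    rw [List.foldl_cons]
    simp only []
    rw [hstep, ih (s + 1)]
    refine Prod.ext ?_ ?_
    · show pvF base cut (s + 1 + (m : Int)) = pvF base cut (s + ((m + 1 : Nat) : Int))
      congr 1; push_cast; ring
    · show (acc ++ [pvF base cut (s + 1)]) ++ _ = _
      rw [List.range_succ_eq_map, List.map_cons, List.map_map, List.append_assoc,
        List.singleton_append]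
      congr 1
      norm_num
      intro a _
      congr 1
      ring

-- ===== VERDICT (by name: the statement is the Claim_ definition above) =====
theorem even_partition_spec : Claim_equal_even_partition := by
  intro num_layers num_pp _ hpre
  obtain ⟨heven, hge⟩ := hpre
  unfold Spec_even_partition even_partition even_partition_alt
  rw [if_neg (not_not_intro heven), if_neg (not_not_intro heven)]
  simp only []
  have hnp : 0 < PySem.Int.floordiv num_pp 2 := by
    have h1 := (PySem.Int.le_floordiv_iff_mul_le (a := num_pp) (b := 2) (q := 1) (by omega)).mpr
      (by omega)
    omega
  have hrem0 : 0 ≤ PySem.Int.mod num_layers (PySem.Int.floordiv num_pp 2) :=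
    PySem.Int.mod_nonneg num_layers hnp
  have hremlt : PySem.Int.mod num_layers (PySem.Int.floordiv num_pp 2)
      < PySem.Int.floordiv num_pp 2 := PySem.Int.mod_lt num_layers hnp
  generalize hnpe : PySem.Int.floordiv num_pp 2 = np at hnp hrem0 hremlt ⊢
  generalize hre : PySem.Int.mod num_layers np = rem at hrem0 hremlt ⊢
  generalize hbe : PySem.Int.floordiv num_layers np = base at ⊢
  obtain ⟨m, hm⟩ : ∃ m : Nat, np = (m : Int) + 1 := ⟨(np - 1).toNat, by omega⟩
  have hrep : PySem.List.pyRepeat [base] np = List.replicate (m + 1) base := by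
    rw [PySem.List.pyRepeat_singleton]
    congr 1; omega
  have hhead : List.replicate (m + 1) base = base :: List.replicate m base :=
    List.replicate_succ ..
  have hcurr0 : base - 1 = pvF base (np - 1 - rem) 0 := by
    simp only [pvF]; omega
  rw [hrep, hhead, PySem.List.pyGet?_zero_cons]
  simp only [Option.getD_some, ← hhead, hcurr0]
  rw [pvLoop np rem base (np - 1 - rem) rfl (m + 1) 0 [pvF base (np - 1 - rem) 0]]
  simp only []
  have hsub : [pvF base (np - 1 - rem) 0] ++
      (List.range (m + 1)).map (fun k : Nat => pvF base (np - 1 - rem) (0 + (k : Int) + 1))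
      = (List.range (m + 2)).map (fun k : Nat => pvF base (np - 1 - rem) (k : Int)) := by
    conv_rhs => rw [show m + 2 = (m + 1) + 1 from rfl, List.range_succ_eq_map]
    simp only [List.map_cons, List.map_map, Function.comp_def, Nat.cast_zero,
      List.singleton_append]
    congr 1
    refine List.map_congr_left (fun k _ => ?_)
    congr 1; push_cast; ring
  rw [hsub]
  have hslice : PySem.List.slice
      ((List.range (m + 2)).map (fun k : Nat => pvF base (np - 1 - rem) (k : Int)))
      none (some (np - 1))
      = (List.range m).map (fun k : Nat => pvF base (np - 1 - rem) (k : Int)) := by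
    rw [PySem.List.slice_to _ (by omega)]
    rw [show (np - 1).toNat = m from by omega, ← List.map_take, List.take_range]
    congr 2; omega
  rw [hslice]
  have hB : (PySem.List.pyRange 0 (np - 1) 1).map
      (fun i => pvF base (np - 1 - rem) 0 + i * base + max 0 (i - (np - 1 - rem)))
      = (List.range m).map (fun k : Nat => pvF base (np - 1 - rem) (k : Int)) := by
    rw [PySem.List.pyRange_one, List.map_map]
    rw [show ((np - 1) - 0).toNat = m from by omega]
    refine List.map_congr_left (fun k _ => ?_)
    simp [pvF]
    omega
  rw [hB]
  rw [show PySem.List.pyRange 0 2 1 = [0, 1] from by decide]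
  simp
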